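-- pv_equiv track=rewrite | github.com/xbrlus/xule | xule3/XuleValue.py | unit_cancel
-- ===== SOURCE A (Python) =====
-- def unit_cancel(left, right):
--     #need mutable structure
--     left_list = list(left)
--     right_list = list(right)
--
--     for l in range(len(left_list)):
--         for r in range(len(right_list)):
--             if left_list[l] == right_list[r]:
--                 left_list[l] = None
--                 right_list[r] = None
--
--     return tuple(x for x in left_list if x is not None), tuple(x for x in right_list if x is not None)
-- ===== SOURCE B (Python) =====
-- def unit_cancel(left, right):
--     # One pass per side with a count map: O(len(left)+len(right)).
--     need = {}
--     for v in right:
--         need[v] = need.get(v, 0) + 1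
--     kept_left = []
--     for v in left:
--         if need.get(v, 0) > 0:
--             need[v] = need.get(v, 0) - 1
--         else:
--             kept_left.append(v)
--     have = {}
--     for v in left:
--         have[v] = have.get(v, 0) + 1
--     kept_right = []
--     for v in right:
--         if have.get(v, 0) > 0:
--             have[v] = have.get(v, 0) - 1
--         else:
--             kept_right.append(v)
--     return tuple(kept_left), tuple(kept_right)
-- ===== Notes on version B (the rewrite author's own statement) =====
-- stated objective: faster
-- what changed: Replaced the quadratic nested index loops with None-marking by two linear passes that consume per-value counts of the opposite side built in a hash map.
import Mathlib
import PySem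

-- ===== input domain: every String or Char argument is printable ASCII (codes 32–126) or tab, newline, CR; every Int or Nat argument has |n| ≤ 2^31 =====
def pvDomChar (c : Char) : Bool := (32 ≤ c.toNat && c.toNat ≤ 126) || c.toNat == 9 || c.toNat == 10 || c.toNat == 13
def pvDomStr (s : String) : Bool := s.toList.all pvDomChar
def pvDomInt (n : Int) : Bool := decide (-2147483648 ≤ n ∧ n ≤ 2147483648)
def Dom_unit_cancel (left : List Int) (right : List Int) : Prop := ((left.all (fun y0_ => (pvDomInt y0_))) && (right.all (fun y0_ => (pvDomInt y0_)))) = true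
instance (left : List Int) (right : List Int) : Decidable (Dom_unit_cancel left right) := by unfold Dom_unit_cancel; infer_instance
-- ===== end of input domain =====

-- B replaces A's quadratic nested index loops (None-marking) by two linear passes
-- consuming per-value counts of the opposite side built in a hash map (objective: faster).

-- ===== PORT A =====
-- A-side helpers: the two loop bodies of A, named so the proofs can speak about them.
-- `for r in range(len(right_list)): if left_list[l] == right_list[r]: …` (None ↦ none;
-- indices from range are in bounds, so `getD _ none` reads exactly the Python element).
def ucInnerStep (l : Nat) (st : List (Option Int) × List (Option Int)) (r : Nat) :
    List (Option Int) × List (Option Int) :=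
  if st.1.getD l none = st.2.getD r none then (st.1.set l none, st.2.set r none) else st

-- `for l in range(len(left_list)): <inner loop>`
def ucOuterStep (st : List (Option Int) × List (Option Int)) (l : Nat) :
    List (Option Int) × List (Option Int) :=
  (List.range st.2.length).foldl (ucInnerStep l) st

def unit_cancel (left : List Int) (right : List Int) : List Int × List Int :=
  let fin := (List.range (left.map some).length).foldl ucOuterStep (left.map some, right.map some)
  (fin.1.filterMap id, fin.2.filterMap id)

-- ===== PORT B =====
-- B-side helpers: `d[v] = d.get(v, 0) + 1` and the consuming pass of Source B.
def ucCountStep (d : PySem.Dict Int Int) (v : Int) : PySem.Dict Int Int :=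
  d.insert v (d.getD v 0 + 1)

def ucConsumeStep (st : PySem.Dict Int Int × List Int) (v : Int) :
    PySem.Dict Int Int × List Int :=
  if st.1.getD v 0 > 0 then (st.1.insert v (st.1.getD v 0 - 1), st.2) else (st.1, st.2 ++ [v])

def unit_cancel_alt (left : List Int) (right : List Int) : List Int × List Int :=
  let need := right.foldl ucCountStep PySem.Dict.empty
  let keptLeft := (left.foldl ucConsumeStep (need, [])).2
  let haveD := left.foldl ucCountStep PySem.Dict.empty
  let keptRight := (right.foldl ucConsumeStep (haveD, [])).2
  (keptLeft, keptRight)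

-- ===== PRECONDITION & SPEC =====
def Spec_unit_cancel (left : List Int) (right : List Int) (out : List Int × List Int) : Prop := out = unit_cancel_alt left right
instance (left : List Int) (right : List Int) (out : List Int × List Int) : Decidable (Spec_unit_cancel left right out) := by unfold Spec_unit_cancel; infer_instance

-- ===== CLAIM (what is proved, stated in full; the proofs are below) =====
def Claim_equal_unit_cancel : Prop := ∀ (left : List Int) (right : List Int), Dom_unit_cancel left right → Spec_unit_cancel left right (unit_cancel left right)

-- ===== LEMMAS AND PROOFS =====

-- Reference form: keep each element whose remaining quota (g) is exhausted,
-- otherwise consume one unit of the quota.  Both ports reduce to this.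
def decAt (g : Int → Nat) (u : Int) : Int → Nat := fun w => if w = u then g u - 1 else g w

def refCancel : List Int → (Int → Nat) → List Int
  | [], _ => []
  | v :: xs, g =>
    if g v = 0 then v :: refCancel xs g
    else refCancel xs (decAt g v)

-- mark the first occurrence of `some x` as none
def setFirst : List (Option Int) → Int → List (Option Int)
  | [], _ => []
  | o :: R, x => if o = some x then none :: R else o :: setFirst R x

-- recursive model of A's nested loops
def goCancel : List Int → List (Option Int) → List (Option Int) × List (Option Int)
  | [], R => ([], R)
  | x :: xs, R =>
    if some x ∈ R then
      let p := goCancel xs (setFirst R x); (none :: p.1, p.2)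
    else
      let p := goCancel xs R; (some x :: p.1, p.2)

def removeAll : List Int → List Int → List Int
  | [], S => S
  | x :: xs, S => removeAll xs (S.erase x)

lemma set_getD_none_eq (L : List (Option Int)) (l : Nat) (h : L.getD l none = none) :
    L.set l none = L := by
  induction L generalizing l with
  | nil => rfl
  | cons o L ih =>
    cases l with
    | zero => simp_all [List.getD]
    | succ l => simp_all [List.getD]

lemma getD_some_lt (L : List (Option Int)) (l : Nat) (v : Int) (h : L.getD l none = some v) :
    l < L.length := by
  by_contra hge
  rw [List.getD_eq_getElem?_getD, List.getElem?_eq_none (by omega)] at h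
  simp at h

lemma getD_set_self_none (L : List (Option Int)) (l : Nat) (h : l < L.length) :
    (L.set l none).getD l none = none := by
  rw [List.getD_eq_getElem?_getD, List.getElem?_set_self h]
  rfl

lemma getD_append_len (P Q : List (Option Int)) :
    (P ++ Q).getD P.length none = Q.getD 0 none := by
  induction P with
  | nil => rfl
  | cons p P ih => simpa [List.getD] using ih

lemma set_append_len (P Q : List (Option Int)) (a : Option Int) :
    (P ++ Q).set P.length a = P ++ Q.set 0 a := by
  induction P with
  | nil => rfl
  | cons p P ih => simp [ih]

lemma inner_none (l : Nat) (rs : List Nat) (L R : List (Option Int))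
    (h : L.getD l none = none) :
    rs.foldl (ucInnerStep l) (L, R) = (L, R) := by
  induction rs generalizing R with
  | nil => rfl
  | cons r rs ih =>
    simp only [List.foldl_cons, ucInnerStep]
    cases hr : R.getD r none with
    | none =>
      rw [h]
      rw [if_pos (rfl : (none : Option Int) = none), set_getD_none_eq L l h, set_getD_none_eq R r hr]
      exact ih R
    | some w =>
      rw [h]
      rw [if_neg (fun hh : (none : Option Int) = some w => by simp at hh)]
      exact ih R

lemma inner_found (l : Nat) (v : Int) (L : List (Option Int)) (h : L.getD l none = some v) :
    ∀ (Q P : List (Option Int)),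
      (List.range' P.length Q.length).foldl (ucInnerStep l) (L, P ++ Q) =
        if some v ∈ Q then (L.set l none, P ++ setFirst Q v) else (L, P ++ Q) := by
  intro Q
  induction Q with
  | nil => intro P; simp
  | cons q Q ih =>
    intro P
    rw [List.length_cons, List.range'_succ, List.foldl_cons]
    have hget : (P ++ q :: Q).getD P.length none = q := by
      rw [getD_append_len]; rfl
    by_cases hq : q = some v
    · subst hq
      simp only [ucInnerStep, hget, h]
      rw [if_pos trivial, set_append_len]
      have hl : l < L.length := getD_some_lt L l v h
      rw [inner_none l _ _ _ (getD_set_self_none L l hl)]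
      simp [setFirst]
    · simp only [ucInnerStep, hget, h]
      rw [if_neg (fun hh : (some v : Option Int) = q => hq hh.symm)]
      have hP : (P ++ [q]).length = P.length + 1 := by simp
      have := ih (P ++ [q])
      rw [hP] at this
      rw [List.append_assoc] at this
      simp only [List.cons_append, List.nil_append] at this
      rw [this]
      have hmem : (some v ∈ q :: Q) ↔ (some v ∈ Q) := by
        rw [List.mem_cons]; exact or_iff_right (fun hh => hq hh.symm)
      by_cases hm : some v ∈ Q
      · rw [if_pos hm, if_pos (by simp [hm])]
        simp [setFirst, hq]
      · rw [if_neg hm, if_neg (by rw [hmem]; exact hm)]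

lemma outer_go (xs : List Int) :
    ∀ (P : List (Option Int)) (R : List (Option Int)),
      (List.range' P.length xs.length).foldl ucOuterStep (P ++ xs.map some, R) =
        (P ++ (goCancel xs R).1, (goCancel xs R).2) := by
  induction xs with
  | nil => intro P R; simp [goCancel]
  | cons x xs ih =>
    intro P R
    rw [List.length_cons, List.range'_succ, List.foldl_cons]
    have hstep : ucOuterStep (P ++ (x :: xs).map some, R) P.length =
        (if some x ∈ R then (P ++ none :: xs.map some, setFirst R x)
         else (P ++ (x :: xs).map some, R)) := by
      unfold ucOuterStep
      have hget : (P ++ (x :: xs).map some).getD P.length none = some x := by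
        rw [List.map_cons, getD_append_len]; rfl
      rw [List.range_eq_range']
      have := inner_found P.length x (P ++ (x :: xs).map some) hget R []
      simp only [List.length_nil, List.nil_append] at this
      rw [this]
      by_cases hm : some x ∈ R
      · rw [if_pos hm, if_pos hm, List.map_cons, set_append_len]
        rfl
      · rw [if_neg hm, if_neg hm]
    rw [hstep]
    by_cases hm : some x ∈ R
    · rw [if_pos hm]
      have hP : (P ++ [none]).length = P.length + 1 := by simp
      have := ih (P ++ [(none : Option Int)]) (setFirst R x)
      rw [hP, List.append_assoc] at this
      simp only [List.cons_append, List.nil_append] at this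
      rw [this]
      simp [goCancel, hm]
    · rw [if_neg hm]
      have hP : (P ++ [some x]).length = P.length + 1 := by simp
      have := ih (P ++ [some x]) R
      rw [hP, List.append_assoc] at this
      simp only [List.cons_append, List.nil_append] at this
      rw [List.map_cons, this]
      simp [goCancel, hm]

lemma mem_some_iff (R : List (Option Int)) (x : Int) :
    some x ∈ R ↔ x ∈ R.filterMap id := by
  simp [List.mem_filterMap]

lemma fm_cons_some (u : Int) (L : List (Option Int)) :
    (some u :: L).filterMap id = u :: L.filterMap id := by simp

lemma fm_cons_none (L : List (Option Int)) :
    ((none : Option Int) :: L).filterMap id = L.filterMap id := by simp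

lemma filterMap_setFirst (R : List (Option Int)) (x : Int) :
    (setFirst R x).filterMap id = (R.filterMap id).erase x := by
  induction R with
  | nil => rfl
  | cons o R ih =>
    cases o with
    | none =>
      rw [setFirst, if_neg (by simp), fm_cons_none, fm_cons_none, ih]
    | some u =>
      by_cases h : u = x
      · subst h
        rw [setFirst, if_pos rfl, fm_cons_none, fm_cons_some, List.erase_cons_head]
      · rw [setFirst, if_neg (by simp [h]), fm_cons_some, fm_cons_some,
            List.erase_cons_tail (by simp [h]), ih]

lemma refCancel_congr (S : List Int) (g g' : Int → Nat) (h : ∀ v ∈ S, g v = g' v) :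
    refCancel S g = refCancel S g' := by
  induction S generalizing g g' with
  | nil => rfl
  | cons v S ih =>
    have hv : g v = g' v := h v (by simp)
    simp only [refCancel, hv]
    by_cases h0 : g' v = 0
    · rw [if_pos h0, if_pos h0, ih _ _ (fun w hw => h w (by simp [hw]))]
    · rw [if_neg h0, if_neg h0]
      apply ih
      intro w hw
      by_cases hwv : w = v <;> simp [decAt, hwv, hv, h w (by simp [hw])]

lemma count_erase_fun (S : List Int) (x : Int) (w : Int) :
    (S.erase x).count w = if w = x then S.count w - 1 else S.count w := by
  rw [List.count_erase]
  simp only [beq_iff_eq]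
  by_cases h : w = x
  · subst h; simp
  · rw [if_neg (fun hh => h hh.symm), if_neg h]
    omega

lemma count_mem_some (R : List (Option Int)) (x : Int) (h : some x ∈ R) :
    (R.filterMap id).count x ≠ 0 := by
  have : x ∈ R.filterMap id := (mem_some_iff R x).1 h
  rw [← List.count_pos_iff] at this
  omega

lemma count_not_mem_some (R : List (Option Int)) (x : Int) (h : some x ∉ R) :
    (R.filterMap id).count x = 0 :=
  List.count_eq_zero.2 (fun hmem => h ((mem_some_iff R x).2 hmem))

lemma go_fst (xs : List Int) :
    ∀ R : List (Option Int),
      (goCancel xs R).1.filterMap id = refCancel xs (fun v => (R.filterMap id).count v) := by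
  induction xs with
  | nil => intro R; rfl
  | cons x xs ih =>
    intro R
    by_cases hm : some x ∈ R
    · simp only [goCancel, if_pos hm, refCancel]
      rw [if_neg (count_mem_some R x hm), fm_cons_none, ih (setFirst R x)]
      apply refCancel_congr
      intro w _
      rw [filterMap_setFirst, count_erase_fun]
      by_cases hwx : w = x <;> simp [decAt, hwx]
    · simp only [goCancel, if_neg hm, refCancel]
      rw [if_pos (count_not_mem_some R x hm), fm_cons_some, ih R]

lemma go_snd (xs : List Int) :
    ∀ R : List (Option Int),
      (goCancel xs R).2.filterMap id = removeAll xs (R.filterMap id) := by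
  induction xs with
  | nil => intro R; rfl
  | cons x xs ih =>
    intro R
    by_cases hm : some x ∈ R
    · simp only [goCancel, if_pos hm, removeAll]
      rw [ih (setFirst R x), filterMap_setFirst]
    · simp only [goCancel, if_neg hm, removeAll]
      rw [ih R]
      congr 1
      rw [List.erase_of_not_mem]
      rw [← mem_some_iff]; exact hm

lemma refCancel_zero (S : List Int) (g : Int → Nat) (h : ∀ v, g v = 0) :
    refCancel S g = S := by
  induction S with
  | nil => rfl
  | cons v S ih => simp [refCancel, h, ih]

lemma refCancel_inc (x : Int) (g : Int → Nat) :
    ∀ S : List Int,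
      refCancel S (fun w => if w = x then g x + 1 else g w) = refCancel (S.erase x) g := by
  intro S
  induction S generalizing g with
  | nil => rfl
  | cons u S ih =>
    by_cases hux : u = x
    · subst hux
      rw [List.erase_cons_head]
      simp only [refCancel]
      rw [if_neg (by simp)]
      exact refCancel_congr _ _ _ (fun w _ => by by_cases hwu : w = u <;> simp [decAt, hwu])
    · rw [List.erase_cons_tail (by simp [hux])]
      simp only [refCancel]
      simp only [if_neg hux]
      by_cases h0 : g u = 0
      · rw [if_pos h0, if_pos h0, ih g]
      · rw [if_neg h0, if_neg h0]
        have step1 : refCancel S (decAt (fun w => if w = x then g x + 1 else g w) u)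
            = refCancel S (fun w => if w = x then decAt g u x + 1 else decAt g u w) := by
          apply refCancel_congr
          intro w _
          by_cases hwu : w = u
          · subst hwu; simp [decAt, hux]
          · by_cases hwx : w = x <;> simp [decAt, hwu, hwx, Ne.symm hux]
        rw [step1, ih (decAt g u)]

lemma removeAll_eq_refCancel (xs : List Int) :
    ∀ S : List Int, removeAll xs S = refCancel S (fun v => xs.count v) := by
  induction xs with
  | nil =>
    intro S
    rw [removeAll, refCancel_zero _ _ (by simp)]
  | cons x xs ih =>
    intro S
    rw [removeAll, ih (S.erase x), ← refCancel_inc x (fun v => xs.count v) S]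
    apply refCancel_congr
    intro w _
    rw [List.count_cons]
    by_cases h : w = x
    · subst h; simp
    · simp [h, Ne.symm h]

lemma filterMap_id_map_some (xs : List Int) : (xs.map some).filterMap id = xs := by
  simp [List.filterMap_map]

-- A equals the reference pair
lemma unit_cancel_eq_ref (left right : List Int) :
    unit_cancel left right =
      (refCancel left (fun v => right.count v), refCancel right (fun v => left.count v)) := by
  have hdef : unit_cancel left right =
      (((List.range (left.map some).length).foldl ucOuterStep
          (left.map some, right.map some)).1.filterMap id,
       ((List.range (left.map some).length).foldl ucOuterStep
          (left.map some, right.map some)).2.filterMap id) := rfl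
  have h0 := outer_go left ([] : List (Option Int)) (right.map some)
  simp only [List.length_nil, List.nil_append] at h0
  rw [← List.range_eq_range'] at h0
  rw [hdef, List.length_map, h0]
  rw [go_fst, go_snd, filterMap_id_map_some, removeAll_eq_refCancel]

-- B-side: the counting pass
lemma count_pass (L : List Int) :
    ∀ (d : PySem.Dict Int Int) (g : Int → Nat) (acc : List Int),
      (∀ v, d.getD v 0 = (g v : Int)) →
      (L.foldl ucConsumeStep (d, acc)).2 = acc ++ refCancel L g := by
  induction L with
  | nil => intro d g acc _; simp [refCancel]
  | cons x L ih =>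
    intro d g acc h
    simp only [List.foldl_cons, ucConsumeStep, h x]
    by_cases h0 : g x = 0
    · rw [if_neg (by simp [h0])]
      simp only [refCancel]
      rw [if_pos h0]
      rw [ih d g (acc ++ [x]) h]
      simp
    · rw [if_pos (by exact_mod_cast Nat.pos_of_ne_zero h0)]
      simp only [refCancel]
      rw [if_neg h0]
      apply ih
      intro v
      rw [PySem.Dict.getD_insert]
      by_cases hv : v = x
      · subst hv
        rw [if_pos rfl]
        simp only [decAt]
        rw [if_pos trivial]
        have h1 : 1 ≤ g v := Nat.pos_of_ne_zero h0
        omega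
      · rw [if_neg hv, h v]
        simp [decAt, hv]

lemma counter_getD (L : List Int) (v : Int) :
    (L.foldl ucCountStep PySem.Dict.empty).getD v 0 = (L.count v : Int) := by
  have he : ucCountStep = fun (d : PySem.Dict Int Int) x => d.insert x (d.getD x 0 + 1) := rfl
  rw [he, PySem.Dict.getD_foldl_insert_add_one]
  simp

lemma unit_cancel_alt_eq_ref (left right : List Int) :
    unit_cancel_alt left right =
      (refCancel left (fun v => right.count v), refCancel right (fun v => left.count v)) := by
  have hdef : unit_cancel_alt left right =
      ((left.foldl ucConsumeStep (right.foldl ucCountStep PySem.Dict.empty, [])).2,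
       (right.foldl ucConsumeStep (left.foldl ucCountStep PySem.Dict.empty, [])).2) := rfl
  rw [hdef,
      count_pass left _ (fun v => right.count v) [] (fun v => counter_getD right v),
      count_pass right _ (fun v => left.count v) [] (fun v => counter_getD left v)]
  simp

-- ===== VERDICT (by name: the statement is the Claim_ definition above) =====
theorem unit_cancel_spec : Claim_equal_unit_cancel := by
  intro left right _
  unfold Spec_unit_cancel
  rw [unit_cancel_eq_ref, unit_cancel_alt_eq_ref]
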